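-- pv_equiv track=rewrite | github.com/sauryeo/MoBaNet | Model/models/dinov2/build_dinov2.py | _parse_tap_indices
-- ===== SOURCE A (Python) =====
-- from typing import List, Optional, Sequence, Tuple
--
-- def _parse_tap_indices(value) -> List[int]:
--     if value is None:
--         return []
--     if isinstance(value, Sequence) and not isinstance(value, (str, bytes)):
--         out = []
--         for v in value:
--             try:
--                 out.append(int(v))
--             except (TypeError, ValueError):
--                 continue
--         return out
--     if isinstance(value, str):
--         text = value.strip()
--         if not text:
--             return []
--         out = []
--         for chunk in text.split(","):
--             chunk = chunk.strip()
--             if not chunk: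
--                 continue
--             try:
--                 out.append(int(chunk))
--             except ValueError:
--                 continue
--         return out
--     try:
--         return [int(value)]
--     except (TypeError, ValueError):
--         return []
-- ===== SOURCE B (Python) =====
-- from typing import List, Optional, Sequence, Tuple
--
-- def _parse_tap_indices(value) -> List[int]:
--     # Recursive descent instead of split/strip + accumulator loops: peel off the
--     # first comma-separated field (resp. the first sequence element), recurse on
--     # the remainder, and prepend the parsed head.  int() itself strips whitespace
--     # and rejects empty/blank fields, so no per-chunk strip is needed.
--     if value is None:
--         return []
--     if isinstance(value, str):
--         return _fields(value)
--     if isinstance(value, Sequence) and not isinstance(value, bytes):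
--         return _items(list(value))
--     try:
--         return [int(value)]
--     except (TypeError, ValueError):
--         return []
--
-- def _fields(text: str) -> List[int]:
--     i = text.find(",")
--     if i < 0:
--         head, tail = text, []
--     else:
--         head, tail = text[:i], _fields(text[i + 1:])
--     try:
--         return [int(head)] + tail
--     except ValueError:
--         return tail
--
-- def _items(items: list) -> List[int]:
--     if not items:
--         return []
--     tail = _items(items[1:])
--     try:
--         return [int(items[0])] + tail
--     except (TypeError, ValueError):
--         return tail
-- ===== Notes on version B (the rewrite author's own statement) =====
-- stated objective: alternative
-- what changed: B is a recursive descent: it peels off the first comma-separated field (text.find + slices) resp. the first sequence element, recurses on the remainder and prepends int(head), relying on int()'s own whitespace stripping and ValueError on blank fields, instead of A's split(',')/per-chunk strip + iterative accumulator loops.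
import Mathlib
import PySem

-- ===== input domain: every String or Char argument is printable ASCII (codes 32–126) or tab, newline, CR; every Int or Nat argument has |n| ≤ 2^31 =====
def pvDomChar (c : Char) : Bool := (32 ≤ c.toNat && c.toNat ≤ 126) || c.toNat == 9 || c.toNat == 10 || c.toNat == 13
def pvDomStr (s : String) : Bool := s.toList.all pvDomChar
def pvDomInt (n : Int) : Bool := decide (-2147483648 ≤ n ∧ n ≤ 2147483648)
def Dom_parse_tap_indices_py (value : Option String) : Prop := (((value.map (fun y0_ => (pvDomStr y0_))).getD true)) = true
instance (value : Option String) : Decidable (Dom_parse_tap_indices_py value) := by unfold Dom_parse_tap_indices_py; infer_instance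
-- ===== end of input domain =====

-- B is a recursive descent (peel the first comma field via find/slices, recurse, prepend int(head),
-- letting int() do the stripping), instead of A's split(',') + per-chunk strip + accumulator loop.
-- On Option String inputs only the None and str branches of the Python are reachable; the ports transcribe those.

-- ===== PORT A =====
-- A, str branch: strip the whole text, early [] if empty, then loop over comma chunks,
-- stripping each, skipping empties, appending int(chunk) and skipping ValueError.
def parse_tap_indices_py (value : Option String) : List Int :=
  match value with
  | none => []
  | some s =>
    let text := PySem.Str.strip s
    if text = "" then []
    else
      ((PySem.Str.split? text ",").getD []).foldl
        (fun out chunk =>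
          let c := PySem.Str.strip chunk
          if c = "" then out
          else
            match PySem.Int.ofStr? c with      -- int(chunk); none = ValueError, skipped
            | some n => out ++ [n]
            | none => out) []

-- ===== PORT B =====
-- B helper _fields, on the character list: i = text.find(","); head = text[:i] (the chars before the
-- first comma, i.e. takeWhile ≠ ','), remainder text[i+1:] (the chars after it, via dropWhile ≠ ',');
-- if there is no comma (find < 0, dropWhile = []) head is the whole text and tail = [];
-- int(head) parses with Python's own whitespace handling, ValueError (none) drops the field.
def pv_fields (cs : List Char) : List Int :=
  match h : cs.dropWhile (fun ch => !(ch == ',')) with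
  | [] =>                                      -- no comma: head = text, tail = []
    match PySem.Int.ofChars? cs with
    | some n => [n]
    | none => []
  | _ :: rs =>                                 -- comma found: head = text[:i], recurse on text[i+1:]
    let tail := pv_fields rs
    match PySem.Int.ofChars? (cs.takeWhile (fun ch => !(ch == ','))) with
    | some n => n :: tail
    | none => tail
termination_by cs.length
decreasing_by
  have hle := List.length_dropWhile_le (fun ch => !(ch == ',')) cs
  rw [h] at hle; simp at hle; omega

def parse_tap_indices_py_alt (value : Option String) : List Int :=
  match value with
  | none => []
  | some s => pv_fields s.toList

-- ===== PRECONDITION & SPEC =====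
def Spec_parse_tap_indices_py (value : Option String) (out : List Int) : Prop := out = parse_tap_indices_py_alt value
instance (value : Option String) (out : List Int) : Decidable (Spec_parse_tap_indices_py value out) := by unfold Spec_parse_tap_indices_py; infer_instance

-- ===== CLAIM (what is proved, stated in full; the proofs are below) =====
def Claim_equal_parse_tap_indices_py : Prop := ∀ (value : Option String), Dom_parse_tap_indices_py value → Spec_parse_tap_indices_py value (parse_tap_indices_py value)

-- ===== LEMMAS AND PROOFS =====

-- the whitespace-trimmed core int() actually reads
def pvCore (s : List Char) : List Char :=
  ((s.dropWhile PySem.Int.isIntSpace).reverse.dropWhile PySem.Int.isIntSpace).reverse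

-- int(s) depends only on the trimmed core
theorem pv_ofChars_congr (s t : List Char) (h : pvCore s = pvCore t) :
    PySem.Int.ofChars? s = PySem.Int.ofChars? t := by
  unfold PySem.Int.ofChars?
  simp only [pvCore] at h
  rw [h]

theorem pv_dropWhile_all {α : Type} (p : α → Bool) (l : List α) (h : ∀ c ∈ l, p c = true) :
    List.dropWhile p l = [] :=
  List.dropWhile_eq_nil_iff.mpr (fun x hx => h x hx)

-- leading int-whitespace is invisible to int()
theorem pv_ofChars_ws_left (ws s : List Char) (h : ∀ c ∈ ws, PySem.Int.isIntSpace c = true) :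
    PySem.Int.ofChars? (ws ++ s) = PySem.Int.ofChars? s := by
  apply pv_ofChars_congr
  unfold pvCore
  rw [List.dropWhile_append, pv_dropWhile_all _ ws h]
  simp

-- trailing int-whitespace is invisible to int()
theorem pv_ofChars_ws_right (s ws : List Char) (h : ∀ c ∈ ws, PySem.Int.isIntSpace c = true) :
    PySem.Int.ofChars? (s ++ ws) = PySem.Int.ofChars? s := by
  apply pv_ofChars_congr
  unfold pvCore
  rw [List.dropWhile_append]
  by_cases h0 : List.dropWhile PySem.Int.isIntSpace s = []
  · rw [h0]
    simp [pv_dropWhile_all _ ws h]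
  · rw [if_neg (by simpa using h0), List.reverse_append, List.dropWhile_append,
      pv_dropWhile_all _ ws.reverse (by simpa using h)]
    simp

-- on the grader's ASCII domain, str-whitespace IS int-whitespace
theorem pv_isspace_isIntSpace (c : Char) (hd : pvDomChar c = true)
    (hs : PySem.Chars.isspace c = true) : PySem.Int.isIntSpace c = true := by
  have inj : ∀ d : Char, c.toNat = d.toNat → c = d := by
    intro d h
    have h1 := Char.ofNat_toNat c
    rw [h] at h1
    rw [← h1, Char.ofNat_toNat d]
  have hn : c.toNat = 32 ∨ c.toNat = 9 ∨ c.toNat = 10 ∨ c.toNat = 13 := by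
    simp [pvDomChar] at hd
    simp [PySem.Chars.isspace] at hs
    omega
  rcases hn with h | h | h | h
  · rw [inj ' ' (by rw [h]; decide)]; decide
  · rw [inj '\t' (by rw [h]; decide)]; decide
  · rw [inj '\n' (by rw [h]; decide)]; decide
  · rw [inj '\x0d' (by rw [h]; decide)]; decide

-- int-whitespace is never a comma
theorem pv_sp_ne_comma (c : Char) (h : PySem.Int.isIntSpace c = true) : (c == ',') = false := by
  simp [PySem.Int.isIntSpace] at h
  rcases h with ((((h | h) | h) | h) | h) | h <;> simp [h]

theorem pv_takeWhile_all {α : Type} (p : α → Bool) (l : List α) (h : ∀ c ∈ l, p c = true) :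
    List.takeWhile p l = l := by
  induction l with
  | nil => rfl
  | cons a t ih =>
    rw [List.takeWhile_cons_of_pos (h a (by simp)), ih (fun c hc => h c (by simp [hc]))]

-- recursive characterization of text.split(",") for the one-char separator
def pv_splitRec (cs : List Char) : List (List Char) :=
  match h : cs.dropWhile (fun ch => !(ch == ',')) with
  | [] => [cs]
  | _ :: rs => cs.takeWhile (fun ch => !(ch == ',')) :: pv_splitRec rs
termination_by cs.length
decreasing_by
  have hle := List.length_dropWhile_le (fun ch => !(ch == ',')) cs
  rw [h] at hle; simp at hle; omega

theorem pv_splitRec_nil (cs : List Char) (h : cs.dropWhile (fun ch => !(ch == ',')) = []) :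
    pv_splitRec cs = [cs] := by
  rw [pv_splitRec]
  split
  · rfl
  · next a rs h2 => rw [h] at h2; cases h2

theorem pv_splitRec_cons (cs : List Char) (a : Char) (rs : List Char)
    (h : cs.dropWhile (fun ch => !(ch == ',')) = a :: rs) :
    pv_splitRec cs = cs.takeWhile (fun ch => !(ch == ',')) :: pv_splitRec rs := by
  rw [pv_splitRec]
  split
  · next h2 => rw [h] at h2; cases h2
  · next b rs2 h2 => rw [h] at h2; cases h2; rfl

theorem pv_splitRec_ne_nil (cs : List Char) : pv_splitRec cs ≠ [] := by
  cases h : cs.dropWhile (fun ch => !(ch == ',')) with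
  | nil => rw [pv_splitRec_nil cs h]; simp
  | cons a rs => rw [pv_splitRec_cons cs a rs h]; simp

theorem pv_go_nil (fuel : Nat) (cur : List Char) (acc : List (List Char)) :
    PySem.Chars.splitOn.go [','] (fuel+1) [] cur acc = (cur.reverse :: acc).reverse := by
  rw [PySem.Chars.splitOn.go.eq_def]

theorem pv_go_cons (fuel : Nat) (c : Char) (rest cur : List Char) (acc : List (List Char)) :
    PySem.Chars.splitOn.go [','] (fuel+1) (c::rest) cur acc =
      if [','].isPrefixOf (c::rest) then PySem.Chars.splitOn.go [','] fuel rest [] (cur.reverse :: acc)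
      else PySem.Chars.splitOn.go [','] fuel rest (c :: cur) acc := by
  rw [PySem.Chars.splitOn.go.eq_def]
  rfl

theorem pv_go_eq (fuel : Nat) (l cur : List Char) (acc : List (List Char))
    (hf : l.length < fuel) :
    PySem.Chars.splitOn.go [','] fuel l cur acc
      = acc.reverse ++ (pv_splitRec l).modifyHead (cur.reverse ++ ·) := by
  induction fuel generalizing l cur acc with
  | zero => omega
  | succ fuel ih =>
    cases l with
    | nil =>
      rw [pv_go_nil, pv_splitRec_nil [] (by simp)]
      simp
    | cons c rest =>
      rw [pv_go_cons]
      by_cases hc : c = ','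
      · subst hc
        have hpre : [','].isPrefixOf (',' :: rest) = true := by simp [List.isPrefixOf]
        simp only [hpre, if_true]
        rw [ih rest [] ((cur.reverse :: acc)) (by simp at hf ⊢; omega)]
        rw [pv_splitRec_cons (',' :: rest) ',' rest (by simp)]
        cases pv_splitRec rest <;> simp
      · have hpre : [','].isPrefixOf (c :: rest) = false := by
          simp [List.isPrefixOf]
          exact fun h => absurd h.symm hc
        simp only [hpre, Bool.false_eq_true, if_false]
        rw [ih rest (c :: cur) acc (by simp at hf ⊢; omega)]
        have hkeep : (fun ch => !(ch == ',')) c = true := by simp [hc]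
        cases hdw : rest.dropWhile (fun ch => !(ch == ',')) with
        | nil =>
          rw [pv_splitRec_nil rest hdw,
            pv_splitRec_nil (c :: rest) (by simp [hkeep, hdw])]
          simp
        | cons a rs =>
          rw [pv_splitRec_cons rest a rs hdw,
            pv_splitRec_cons (c :: rest) a rs (by simp [hkeep, hdw]),
            List.takeWhile_cons_of_pos (p := fun ch => !(ch == ',')) (by simp [hc])]
          cases pv_splitRec rs <;> simp
  -- the match in go.eq_def reduces definitionally in each branch above

theorem pv_splitOn_eq (cs : List Char) :
    PySem.Chars.splitOn cs [','] = pv_splitRec cs := by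
  unfold PySem.Chars.splitOn
  rw [pv_go_eq (cs.length + 1) cs [] [] (by omega)]
  cases hrec : pv_splitRec cs with
  | nil => exact absurd hrec (pv_splitRec_ne_nil cs)
  | cons f t => simp

-- B's parse of the whole text, seen through the split: one int() per field, in order
def pvF (cs : List Char) : List Int := (pv_splitRec cs).filterMap PySem.Int.ofChars?

theorem pv_fields_eq (cs : List Char) : pv_fields cs = pvF cs := by
  cases h : cs.dropWhile (fun ch => !(ch == ',')) with
  | nil =>
    rw [pv_fields, pvF, pv_splitRec_nil cs h]
    split
    · cases hi : PySem.Int.ofChars? cs <;> simp [hi]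
    · next a rs h2 => rw [h] at h2; cases h2
  | cons a rs =>
    rw [pv_fields, pvF, pv_splitRec_cons cs a rs h]
    split
    · next h2 => rw [h] at h2; cases h2
    · next b rs2 h2 =>
      rw [h] at h2; cases h2
      have := pv_fields_eq rs
      rw [pvF] at this
      cases hi : PySem.Int.ofChars? (cs.takeWhile (fun ch => !(ch == ','))) <;>
        simp [hi, this]
termination_by cs.length
decreasing_by
  have hle := List.length_dropWhile_le (fun ch => !(ch == ',')) cs
  rw [h] at hle; simp at hle; omega

-- every character of every field of the split occurs in the text
theorem pv_splitRec_mem (cs : List Char) :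
    ∀ f ∈ pv_splitRec cs, ∀ c ∈ f, c ∈ cs := by
  cases h : cs.dropWhile (fun ch => !(ch == ',')) with
  | nil =>
    rw [pv_splitRec_nil cs h]
    intro f hf c hc
    simp at hf; subst hf; exact hc
  | cons a rs =>
    rw [pv_splitRec_cons cs a rs h]
    intro f hf c hc
    rcases List.mem_cons.mp hf with hf | hf
    · subst hf
      exact (List.takeWhile_prefix _).sublist.subset hc
    · have hrs : c ∈ rs := pv_splitRec_mem rs f hf c hc
      have : c ∈ cs.dropWhile (fun ch => !(ch == ',')) := by rw [h]; simp [hrs]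
      exact (List.dropWhile_suffix _).sublist.subset this
termination_by cs.length
decreasing_by
  have hle := List.length_dropWhile_le (fun ch => !(ch == ',')) cs
  rw [h] at hle; simp at hle; omega

-- prepending whitespace to the text changes no parsed field
theorem pvF_ws_left (ws cs : List Char) (h : ∀ c ∈ ws, PySem.Int.isIntSpace c = true) :
    pvF (ws ++ cs) = pvF cs := by
  have hkeep : ∀ c ∈ ws, (fun ch => !(ch == ',')) c = true := by
    intro c hc; simp [pv_sp_ne_comma c (h c hc)]
  have hdw : (ws ++ cs).dropWhile (fun ch => !(ch == ','))
      = cs.dropWhile (fun ch => !(ch == ',')) := by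
    rw [List.dropWhile_append, pv_dropWhile_all _ ws hkeep]; simp
  have htw : (ws ++ cs).takeWhile (fun ch => !(ch == ','))
      = ws ++ cs.takeWhile (fun ch => !(ch == ',')) := by
    rw [List.takeWhile_append, if_pos]
    congr 1
    rw [pv_takeWhile_all _ ws hkeep]
  cases hd : cs.dropWhile (fun ch => !(ch == ',')) with
  | nil =>
    rw [pvF, pvF, pv_splitRec_nil cs hd, pv_splitRec_nil (ws ++ cs) (by rw [hdw, hd])]
    rw [List.filterMap_cons, List.filterMap_cons, pv_ofChars_ws_left ws cs h]
  | cons a rs =>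
    rw [pvF, pvF, pv_splitRec_cons cs a rs hd,
      pv_splitRec_cons (ws ++ cs) a rs (by rw [hdw, hd]), htw]
    rw [List.filterMap_cons, List.filterMap_cons, pv_ofChars_ws_left ws _ h]

-- appending whitespace to the text changes no parsed field
theorem pvF_ws_right (cs ws : List Char) (h : ∀ c ∈ ws, PySem.Int.isIntSpace c = true) :
    pvF (cs ++ ws) = pvF cs := by
  have hkeep : ∀ c ∈ ws, (fun ch => !(ch == ',')) c = true := by
    intro c hc; simp [pv_sp_ne_comma c (h c hc)]
  cases hd : cs.dropWhile (fun ch => !(ch == ',')) with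
  | nil =>
    have hdw : (cs ++ ws).dropWhile (fun ch => !(ch == ',')) = [] := by
      rw [List.dropWhile_append, hd, pv_dropWhile_all _ ws hkeep]; simp
    rw [pvF, pvF, pv_splitRec_nil cs hd, pv_splitRec_nil (cs ++ ws) hdw]
    rw [List.filterMap_cons, List.filterMap_cons, pv_ofChars_ws_right cs ws h]
  | cons a rs =>
    have hlen := congrArg List.length (List.takeWhile_append_dropWhile
      (p := fun ch => !(ch == ',')) (l := cs))
    rw [hd] at hlen
    simp at hlen
    have hdw : (cs ++ ws).dropWhile (fun ch => !(ch == ',')) = a :: (rs ++ ws) := by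
      rw [List.dropWhile_append, hd]; simp
    have htw : (cs ++ ws).takeWhile (fun ch => !(ch == ','))
        = cs.takeWhile (fun ch => !(ch == ',')) := by
      rw [List.takeWhile_append, if_neg]; omega
    rw [pvF, pvF, pv_splitRec_cons cs a rs hd, pv_splitRec_cons (cs ++ ws) a (rs ++ ws) hdw, htw]
    have := pvF_ws_right rs ws h
    rw [pvF, pvF] at this
    cases hi : PySem.Int.ofChars? (cs.takeWhile (fun ch => !(ch == ','))) <;> simp [hi, this]
termination_by cs.length
decreasing_by
  have hle := List.length_dropWhile_le (fun ch => !(ch == ',')) cs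
  rw [hd] at hle; simp at hle; omega

-- text = leading str-whitespace ++ text.strip() ++ trailing str-whitespace
theorem pv_strip_decomp (cs : List Char) :
    ∃ wsl wsr, cs = wsl ++ PySem.Chars.strip cs ++ wsr
      ∧ (∀ c ∈ wsl, PySem.Chars.isspace c = true)
      ∧ (∀ c ∈ wsr, PySem.Chars.isspace c = true) := by
  refine ⟨cs.takeWhile PySem.Chars.isspace,
    ((cs.dropWhile PySem.Chars.isspace).reverse.takeWhile PySem.Chars.isspace).reverse, ?_, ?_, ?_⟩
  · have h1 : cs = cs.takeWhile PySem.Chars.isspace ++ cs.dropWhile PySem.Chars.isspace :=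
      (List.takeWhile_append_dropWhile).symm
    have h2 : cs.dropWhile PySem.Chars.isspace
        = PySem.Chars.strip cs
          ++ ((cs.dropWhile PySem.Chars.isspace).reverse.takeWhile PySem.Chars.isspace).reverse := by
      have h3 : (cs.dropWhile PySem.Chars.isspace).reverse
          = (cs.dropWhile PySem.Chars.isspace).reverse.takeWhile PySem.Chars.isspace
            ++ (cs.dropWhile PySem.Chars.isspace).reverse.dropWhile PySem.Chars.isspace :=
        (List.takeWhile_append_dropWhile).symm
      have h4 := congrArg List.reverse h3
      rw [List.reverse_reverse, List.reverse_append] at h4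
      exact h4
    rw [List.append_assoc, ← h2, ← h1]
  · intro c hc; exact List.mem_takeWhile_imp hc
  · intro c hc; rw [List.mem_reverse] at hc; exact List.mem_takeWhile_imp hc

-- parsing ignores the outer strip: pvF (strip text) = pvF text, on the domain
theorem pvF_strip (cs : List Char) (hdom : ∀ c ∈ cs, pvDomChar c = true) :
    pvF (PySem.Chars.strip cs) = pvF cs := by
  obtain ⟨wsl, wsr, hdec, h1, h2⟩ := pv_strip_decomp cs
  have hsl : ∀ c ∈ wsl, PySem.Int.isIntSpace c = true := by
    intro c hc
    exact pv_isspace_isIntSpace c (hdom c (by rw [hdec]; simp [hc])) (h1 c hc)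
  have hsr : ∀ c ∈ wsr, PySem.Int.isIntSpace c = true := by
    intro c hc
    exact pv_isspace_isIntSpace c (hdom c (by rw [hdec]; simp [hc])) (h2 c hc)
  conv_rhs => rw [hdec]
  rw [List.append_assoc, pvF_ws_left wsl _ hsl, pvF_ws_right _ wsr hsr]

-- A's chunk loop over the split fields computes exactly pvF (on domain fields):
-- 'strip the chunk, skip it if empty, else int(chunk)' is int(chunk) itself
theorem pv_foldA (fields : List (List Char)) (acc : List Int)
    (hdom : ∀ f ∈ fields, ∀ c ∈ f, pvDomChar c = true) :
    fields.foldl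
      (fun out chunk =>
        let c := PySem.Str.strip (String.ofList chunk)
        if c = "" then out
        else
          match PySem.Int.ofStr? c with
          | some n => out ++ [n]
          | none => out) acc
      = acc ++ fields.filterMap PySem.Int.ofChars? := by
  induction fields generalizing acc with
  | nil => simp
  | cons f t ih =>
    have hf : ∀ c ∈ f, pvDomChar c = true := hdom f (by simp)
    have ht : ∀ g ∈ t, ∀ c ∈ g, pvDomChar c = true := fun g hg => hdom g (by simp [hg])
    obtain ⟨wsl, wsr, hdec, h1, h2⟩ := pv_strip_decomp f
    have hsl : ∀ c ∈ wsl, PySem.Int.isIntSpace c = true := by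
      intro c hc
      exact pv_isspace_isIntSpace c (hf c (by rw [hdec]; simp [hc])) (h1 c hc)
    have hsr : ∀ c ∈ wsr, PySem.Int.isIntSpace c = true := by
      intro c hc
      exact pv_isspace_isIntSpace c (hf c (by rw [hdec]; simp [hc])) (h2 c hc)
    have hofs : PySem.Int.ofChars? f = PySem.Int.ofChars? (PySem.Chars.strip f) := by
      conv_lhs => rw [hdec]
      rw [List.append_assoc, pv_ofChars_ws_left wsl _ hsl, pv_ofChars_ws_right _ wsr hsr]
    have hstrip : PySem.Str.strip (String.ofList f) = String.ofList (PySem.Chars.strip f) := by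
      simp [PySem.Str.strip]
    rw [List.foldl_cons]
    simp only [hstrip]
    by_cases he : PySem.Chars.strip f = []
    · have : String.ofList (PySem.Chars.strip f) = "" := by rw [he]
      rw [if_pos this, ih acc ht]
      have hnone : PySem.Int.ofChars? f = none := by
        rw [hofs, he]; rfl
      simp [hnone]
    · have : ¬ String.ofList (PySem.Chars.strip f) = "" := by
        intro hcon
        exact he (by simpa using congrArg String.toList hcon)
      rw [if_neg this]
      have hof : PySem.Int.ofStr? (String.ofList (PySem.Chars.strip f))
          = PySem.Int.ofChars? f := by
        rw [PySem.Int.ofStr?]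
        simp only [String.toList_ofList]
        exact hofs.symm
      rw [hof]
      cases hi : PySem.Int.ofChars? f with
      | none => rw [ih acc ht]; simp [hi]
      | some n => rw [ih (acc ++ [n]) ht]; simp [hi]

-- ===== VERDICT (by name: the statement is the Claim_ definition above) =====
theorem parse_tap_indices_py_spec : Claim_equal_parse_tap_indices_py := by
  intro value hdomv
  unfold Spec_parse_tap_indices_py
  cases value with
  | none => rfl
  | some s =>
    have hdom : ∀ c ∈ s.toList, pvDomChar c = true := by
      simp [Dom_parse_tap_indices_py, pvDomStr, List.all_eq_true] at hdomv
      exact hdomv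
    show parse_tap_indices_py (some s) = parse_tap_indices_py_alt (some s)
    have hB : parse_tap_indices_py_alt (some s) = pvF s.toList := by
      show pv_fields s.toList = pvF s.toList
      exact pv_fields_eq s.toList
    rw [hB]
    have htl : (PySem.Str.strip s).toList = PySem.Chars.strip s.toList :=
      PySem.Str.toList_strip s
    by_cases he : PySem.Str.strip s = ""
    · -- blank text: A returns [] early; every field of s is whitespace, so pvF s = []
      have hstrip0 : PySem.Chars.strip s.toList = [] := by
        rw [← htl, he]; rfl
      have hpvF : pvF s.toList = [] := by
        rw [← pvF_strip s.toList hdom, hstrip0]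
        rw [pvF, pv_splitRec_nil [] (by simp)]
        rfl
      rw [hpvF]
      show (if PySem.Str.strip s = "" then [] else _) = []
      rw [if_pos he]
    · show (if PySem.Str.strip s = "" then [] else _) = pvF s.toList
      rw [if_neg he]
      have hsplit : PySem.Str.split? (PySem.Str.strip s) ","
          = some ((PySem.Chars.splitOn (PySem.Str.strip s).toList [',']).map String.ofList) := by
        rw [PySem.Str.split?, PySem.Chars.split?]
        rfl
      rw [hsplit]
      show ((PySem.Chars.splitOn (PySem.Str.strip s).toList [',']).map String.ofList).foldl _ [] = _
      rw [List.foldl_map, htl, pv_splitOn_eq]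
      have hdomf : ∀ f ∈ pv_splitRec (PySem.Chars.strip s.toList), ∀ c ∈ f, pvDomChar c = true := by
        intro f hf c hc
        have hmem := pv_splitRec_mem (PySem.Chars.strip s.toList) f hf c hc
        obtain ⟨wsl, wsr, hdec, _, _⟩ := pv_strip_decomp s.toList
        exact hdom c (by rw [hdec]; simp [hmem])
      rw [pv_foldA _ [] hdomf]
      rw [List.nil_append, ← pvF, pvF_strip s.toList hdom]
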